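-- pv_equiv track=rewrite | github.com/matauangcina/sherlock | analyze.py | get_rules_list
-- ===== SOURCE A (Python) =====
-- def get_rules_list(args, valid_rules):
--     rules = list()
--     for arg in args:
--         if arg in valid_rules:
--             rules.append(arg)
--         else:
--             rules = list()
--             break
--     return rules
-- ===== SOURCE B (Python) =====
-- def get_rules_list(args, valid_rules):
--     args = list(args)
--     if set(args) <= set(valid_rules):
--         return args
--     return []
-- ===== Notes on version B (the rewrite author's own statement) =====
-- stated objective: alternative
-- what changed: Replaced A's build-or-reset scan (per-arg linear membership scan of valid_rules, appending until the first invalid arg resets and breaks) with a set-algebra formulation: deduplicate both inputs into hash sets once and test set(args) <= set(valid_rules), returning a snapshot of args or []; the inner per-element scan of valid_rules disappears.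
import Mathlib
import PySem

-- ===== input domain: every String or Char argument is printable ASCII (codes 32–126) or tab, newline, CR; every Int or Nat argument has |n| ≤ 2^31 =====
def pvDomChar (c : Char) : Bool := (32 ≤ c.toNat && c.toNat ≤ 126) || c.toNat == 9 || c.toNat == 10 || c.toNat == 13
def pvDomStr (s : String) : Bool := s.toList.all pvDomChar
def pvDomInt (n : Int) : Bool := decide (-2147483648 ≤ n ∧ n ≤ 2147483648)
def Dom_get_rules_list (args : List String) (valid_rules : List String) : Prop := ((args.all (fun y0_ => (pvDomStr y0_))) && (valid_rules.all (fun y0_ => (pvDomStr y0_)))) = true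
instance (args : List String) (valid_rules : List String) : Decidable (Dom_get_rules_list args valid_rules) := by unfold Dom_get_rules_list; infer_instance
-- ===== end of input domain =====

-- B replaces A's build-or-reset scan with a set-algebra test: set(args) <= set(valid_rules), then return args or [] (objective: alternative).

-- ===== PORT A =====
-- A's loop with early break and reset, as structural recursion carrying the accumulated rules
def get_rules_list_go (valid_rules : List String) (rules : List String) : List String → List String
  | [] => rules
  | arg :: rest =>
    if valid_rules.contains arg then get_rules_list_go valid_rules (rules ++ [arg]) rest
    else []

def get_rules_list (args : List String) (valid_rules : List String) : List String :=
  get_rules_list_go valid_rules [] args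

-- ===== PORT B =====
def get_rules_list_alt (args : List String) (valid_rules : List String) : List String :=
  if PySem.Set.issubset (PySem.Set.ofList args) (PySem.Set.ofList valid_rules) then args else []

-- ===== PRECONDITION & SPEC =====
def Spec_get_rules_list (args : List String) (valid_rules : List String) (out : List String) : Prop := out = get_rules_list_alt args valid_rules
instance (args : List String) (valid_rules : List String) (out : List String) : Decidable (Spec_get_rules_list args valid_rules out) := by unfold Spec_get_rules_list; infer_instance

-- ===== CLAIM =====
def Claim_equal_get_rules_list : Prop := ∀ (args : List String) (valid_rules : List String), Dom_get_rules_list args valid_rules → Spec_get_rules_list args valid_rules (get_rules_list args valid_rules)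

-- ===== LEMMAS AND PROOFS =====
theorem get_rules_list_go_eq (valid_rules : List String) (args : List String) :
    ∀ (rules : List String),
      get_rules_list_go valid_rules rules args =
        if args.all (fun a => valid_rules.contains a) then rules ++ args else [] := by
  induction args with
  | nil => intro rules; simp [get_rules_list_go]
  | cons a rest ih =>
    intro rules
    simp only [get_rules_list_go, List.all_cons]
    by_cases h : valid_rules.contains a = true
    · rw [if_pos h, ih]
      simp only [h, Bool.true_and]
      split_ifs <;> simp
    · rw [if_neg h]
      simp only [h, Bool.false_and, if_neg Bool.false_ne_true]

theorem issubset_ofList_eq_all (args valid_rules : List String) :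
    PySem.Set.issubset (PySem.Set.ofList args) (PySem.Set.ofList valid_rules)
      = args.all (fun a => valid_rules.contains a) := by
  rw [Bool.eq_iff_iff, PySem.Set.issubset_iff, List.all_eq_true]
  constructor
  · intro h a ha
    have hm := h a ((PySem.Set.mem_ofList args a).mpr ha)
    simpa using (PySem.Set.mem_ofList valid_rules a).mp hm
  · intro h x hx
    exact (PySem.Set.mem_ofList valid_rules x).mpr
      (by simpa using h x ((PySem.Set.mem_ofList args x).mp hx))

-- ===== VERDICT =====
theorem get_rules_list_spec : Claim_equal_get_rules_list := by
  intro args valid_rules _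
  unfold Spec_get_rules_list get_rules_list get_rules_list_alt
  rw [issubset_ofList_eq_all, get_rules_list_go_eq]
  split_ifs <;> simp
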